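-- pv_equiv track=rewrite | github.com/docxology/MetaInformAnt | src/metainformant/protein/secondary.py | _apply_minimum_length_constraints
-- ===== SOURCE A (Python) =====
-- from typing import Any, Dict, List, Optional
--
-- def _apply_minimum_length_constraints(predictions: List[str]) -> List[str]:
--     """Apply minimum length constraints to secondary structure predictions."""
--     result = predictions.copy()
--     n = len(predictions)
--
--     i = 0
--     while i < n:
--         current_ss = result[i]
--
--         # Find end of current secondary structure element
--         j = i + 1
--         while j < n and result[j] == current_ss:
--             j += 1
--
--         length = j - i
--
--         # If secondary structure element is too short, convert to coil
--         if current_ss in ['H', 'E'] and length < 3: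
--             for k in range(i, j):
--                 result[k] = 'C'
--
--         i = j
--
--     return result
-- ===== SOURCE B (Python) =====
-- def _apply_minimum_length_constraints(predictions):
--     """Apply minimum length constraints to secondary structure predictions."""
--     n = len(predictions)
--
--     def in_long_run(i):
--         # True iff position i lies inside some window of 3 consecutive equal labels,
--         # i.e. iff its maximal run has length >= 3.
--         x = predictions[i]
--         for s in (i - 2, i - 1, i):
--             if 0 <= s and s + 2 < n:
--                 if predictions[s] == x and predictions[s + 1] == x and predictions[s + 2] == x:
--                     return True
--         return False
--
--     return ['C' if predictions[i] in ('H', 'E') and not in_long_run(i)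
--             else predictions[i] for i in range(n)]
-- ===== Notes on version B (the rewrite author's own statement) =====
-- stated objective: alternative
-- what changed: B abandons A's run-scanning rewrite (index pointers i/j locating each maximal run, then an in-place range rewrite of a copied list) for a pointwise windowed map built afresh: position i becomes 'C' exactly when its label is 'H'/'E' and no window of 3 consecutive equal labels contains i, which holds iff i's run is shorter than 3.
import Mathlib
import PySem

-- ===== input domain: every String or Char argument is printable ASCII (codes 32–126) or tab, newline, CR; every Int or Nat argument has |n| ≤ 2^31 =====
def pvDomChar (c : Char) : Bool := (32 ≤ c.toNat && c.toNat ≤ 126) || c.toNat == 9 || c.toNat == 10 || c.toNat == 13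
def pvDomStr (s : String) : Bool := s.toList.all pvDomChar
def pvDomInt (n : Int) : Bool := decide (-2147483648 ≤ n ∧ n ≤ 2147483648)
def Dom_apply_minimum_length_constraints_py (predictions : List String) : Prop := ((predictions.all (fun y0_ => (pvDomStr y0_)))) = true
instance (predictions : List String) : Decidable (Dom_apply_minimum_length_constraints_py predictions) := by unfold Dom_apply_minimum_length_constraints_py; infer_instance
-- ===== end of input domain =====

-- B replaces A's run-scanning rewrite (index pointers i/j locating each run, then an
-- in-place range rewrite) by a pointwise windowed map: position i becomes 'C' exactly
-- when its label is 'H'/'E' and no window of 3 consecutive equal labels contains i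
-- (objective: alternative; same cost, no run bookkeeping at all).

-- ===== PORT A =====
-- inner 'while j < n and result[j] == current_ss: j += 1'
def findEndA (result : List String) (current : String) (n j : Nat) : Nat :=
  if h : j < n ∧ result.getD j "" == current then findEndA result current n (j + 1) else j
termination_by n - j
decreasing_by omega

theorem findEndA_ge (result : List String) (current : String) (n j : Nat) :
    j ≤ findEndA result current n j := by
  fun_induction findEndA with
  | case1 j h ih => omega
  | case2 => omega

-- outer 'while i < n' loop; state = (result, i)
def loopA (n : Nat) (result : List String) (i : Nat) : List String :=
  if h : i < n then
    let current := result.getD i ""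
    let j := findEndA result current n (i + 1)
    let len := j - i
    let result' :=
      if (current = "H" ∨ current = "E") ∧ len < 3 then
        -- for k in range(i, j): result[k] = 'C'
        (List.range' i len).foldl (fun r k => r.set k "C") result
      else result
    loopA n result' j
  else result
termination_by n - i
decreasing_by
  have := findEndA_ge result (result.getD i "") n (i + 1)
  omega

def apply_minimum_length_constraints_py (predictions : List String) : List String :=
  loopA predictions.length predictions 0

-- ===== PORT B =====
-- 'if 0 <= s and s + 2 < n: predictions[s]==x and predictions[s+1]==x and predictions[s+2]==x'
def winB (p : List String) (x : String) (s : Int) : Bool :=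
  decide (0 ≤ s) && decide (s + 2 < (p.length : Int)) &&
  (p.getD s.toNat "" == x) && (p.getD (s.toNat + 1) "" == x) && (p.getD (s.toNat + 2) "" == x)

-- 'for s in (i - 2, i - 1, i): …' of in_long_run, with x = predictions[i]
def inLongRunB (p : List String) (i : Nat) : Bool :=
  let x := p.getD i ""
  winB p x ((i : Int) - 2) || winB p x ((i : Int) - 1) || winB p x (i : Int)

def apply_minimum_length_constraints_py_alt (predictions : List String) : List String :=
  (List.range predictions.length).map (fun i =>
    if (predictions.getD i "" == "H" || predictions.getD i "" == "E") && !inLongRunB predictions i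
    then "C" else predictions.getD i "")

-- ===== PRECONDITION & SPEC =====
def Spec_apply_minimum_length_constraints_py (predictions : List String) (out : List String) : Prop := out = apply_minimum_length_constraints_py_alt predictions
instance (predictions : List String) (out : List String) : Decidable (Spec_apply_minimum_length_constraints_py predictions out) := by unfold Spec_apply_minimum_length_constraints_py; infer_instance

-- ===== CLAIM (what is proved, stated in full; the proofs are below) =====
def Claim_equal_apply_minimum_length_constraints_py : Prop := ∀ (predictions : List String), Dom_apply_minimum_length_constraints_py predictions → Spec_apply_minimum_length_constraints_py predictions (apply_minimum_length_constraints_py predictions)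

-- ===== LEMMAS AND PROOFS =====

-- emit of one run, used by the canonical run-by-run description both ports reduce to
def emitB (label : Option String) (len : Nat) : List String :=
  match label with
  | none => []
  | some l => if (l = "H" ∨ l = "E") ∧ len < 3 then List.replicate len "C" else List.replicate len l

def runsF : List String → List String
  | [] => []
  | x :: xs =>
    emitB (some x) ((xs.takeWhile (· == x)).length + 1) ++ runsF (xs.dropWhile (· == x))
termination_by l => l.length
decreasing_by
  have := List.length_dropWhile_le (p := (· == x)) (l := xs)
  simp; omega

theorem emitB_some (l : String) (k : Nat) :
    emitB (some l) k =
      if (l = "H" ∨ l = "E") ∧ k < 3 then List.replicate k "C" else List.replicate k l := rfl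

-- ---- B = runsF ----

-- Nat-level window predicate
def WinP (p : List String) (x : String) (s : Nat) : Prop :=
  s + 2 < p.length ∧ p.getD s "" = x ∧ p.getD (s + 1) "" = x ∧ p.getD (s + 2) "" = x

theorem winB_iff (p : List String) (x : String) (s0 : Int) :
    winB p x s0 = true ↔ ∃ s : Nat, (s : Int) = s0 ∧ WinP p x s := by
  unfold winB WinP
  constructor
  · intro h
    simp only [Bool.and_eq_true, decide_eq_true_eq, beq_iff_eq] at h
    obtain ⟨⟨⟨⟨h1, h2⟩, h3⟩, h4⟩, h5⟩ := h
    exact ⟨s0.toNat, by omega, by omega, h3, h4, h5⟩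
  · rintro ⟨s, rfl, h1, h2, h3, h4⟩
    simp only [Bool.and_eq_true, decide_eq_true_eq, beq_iff_eq, Int.toNat_natCast]
    exact ⟨⟨⟨⟨by omega, by omega⟩, h2⟩, h3⟩, h4⟩

theorem inLongRunB_iff (p : List String) (i : Nat) :
    inLongRunB p i = true ↔ ∃ s : Nat, s ≤ i ∧ i ≤ s + 2 ∧ WinP p (p.getD i "") s := by
  unfold inLongRunB
  simp only [Bool.or_eq_true, winB_iff]
  constructor
  · rintro ((⟨s, hs, hw⟩ | ⟨s, hs, hw⟩) | ⟨s, hs, hw⟩) <;> exact ⟨s, by omega, by omega, hw⟩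
  · rintro ⟨s, h1, h2, hw⟩
    have : (s : Int) = (i : Int) - 2 ∨ (s : Int) = (i : Int) - 1 ∨ (s : Int) = (i : Int) := by omega
    rcases this with h | h | h
    · exact Or.inl (Or.inl ⟨s, h, hw⟩)
    · exact Or.inl (Or.inr ⟨s, h, hw⟩)
    · exact Or.inr ⟨s, h, hw⟩

-- the body of B's comprehension
def fB (p : List String) (i : Nat) : String :=
  if (p.getD i "" == "H" || p.getD i "" == "E") && !inLongRunB p i then "C" else p.getD i ""

theorem alt_eq_map (p : List String) :
    apply_minimum_length_constraints_py_alt p = (List.range p.length).map (fB p) := rfl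

-- getD over 'replicate m a ++ rest'
theorem getD_rep_left {m : Nat} (a : String) (rest : List String) {k : Nat} (hk : k < m) :
    (List.replicate m a ++ rest).getD k "" = a := by
  unfold List.getD
  rw [List.getElem?_append_left (by simpa using hk)]
  simp [hk]

theorem getD_rep_right {m : Nat} (a : String) (rest : List String) {k : Nat} (hk : m ≤ k) :
    (List.replicate m a ++ rest).getD k "" = rest.getD (k - m) "" := by
  unfold List.getD
  rw [List.getElem?_append_right (by simpa using hk)]
  simp

-- no all-equal window crosses the boundary of the first run
theorem winP_no_cross {m : Nat} (a : String) (rest : List String)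
    (hhead : ∀ b, rest.head? = some b → b ≠ a) {x : String} {s : Nat}
    (h1 : s < m) (h2 : m ≤ s + 2) :
    ¬ WinP (List.replicate m a ++ rest) x s := by
  rintro ⟨hlen, e0, e1, e2⟩
  simp only [List.length_append, List.length_replicate] at hlen
  have hrest : rest ≠ [] := by intro h; subst h; simp at hlen; omega
  obtain ⟨b, bs, rfl⟩ := List.exists_cons_of_ne_nil hrest
  have hba : b ≠ a := hhead b rfl
  have hgm : (List.replicate m a ++ b :: bs).getD m "" = b := by
    rw [getD_rep_right a _ (le_refl m)]; simp
  -- the window contains both m-1 and m, whose labels differ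
  have hcase : s + 1 = m ∨ s + 2 = m := by omega
  rcases hcase with hc | hc
  · have e0' : (List.replicate m a ++ b :: bs).getD s "" = a :=
      getD_rep_left a _ (by omega)
    rw [e0'] at e0
    rw [hc, hgm] at e1
    exact hba (e1.trans e0.symm)
  · have e1' : (List.replicate m a ++ b :: bs).getD (s + 1) "" = a :=
      getD_rep_left a _ (by omega)
    rw [e1'] at e1
    rw [hc, hgm] at e2
    exact hba (e2.trans e1.symm)

theorem winP_shift {m : Nat} (a : String) (rest : List String) {x : String} {s : Nat}
    (hm : m ≤ s) :
    WinP (List.replicate m a ++ rest) x s ↔ WinP rest x (s - m) := by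
  unfold WinP
  rw [getD_rep_right a rest hm, getD_rep_right a rest (by omega),
    getD_rep_right a rest (by omega)]
  simp only [List.length_append, List.length_replicate]
  constructor
  · rintro ⟨h1, h2, h3, h4⟩
    refine ⟨by omega, h2, ?_, ?_⟩
    · rwa [show s + 1 - m = s - m + 1 by omega] at h3
    · rwa [show s + 2 - m = s - m + 2 by omega] at h4
  · rintro ⟨h1, h2, h3, h4⟩
    refine ⟨by omega, h2, ?_, ?_⟩
    · rwa [show s + 1 - m = s - m + 1 by omega]
    · rwa [show s + 2 - m = s - m + 2 by omega]

theorem winP_left {m : Nat} (a : String) (rest : List String) {s : Nat} (hs : s + 2 < m) :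
    WinP (List.replicate m a ++ rest) a s := by
  exact ⟨by simp; omega, getD_rep_left a rest (by omega),
    getD_rep_left a rest (by omega), getD_rep_left a rest hs⟩

-- inside the first run, a long-run witness exists iff the run has length ≥ 3
theorem inLongRunB_left {m : Nat} (a : String) (rest : List String)
    (hhead : ∀ b, rest.head? = some b → b ≠ a) {i : Nat} (hi : i < m) :
    inLongRunB (List.replicate m a ++ rest) i = true ↔ 3 ≤ m := by
  rw [inLongRunB_iff, getD_rep_left a rest hi]
  constructor
  · rintro ⟨s, h1, h2, hw⟩
    by_cases hsm : s + 2 < m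
    · omega
    · exact absurd hw (winP_no_cross a rest hhead (by omega) (by omega))
  · intro hm
    refine ⟨min i (m - 3), by omega, by omega, winP_left a rest (by omega)⟩

theorem inLongRunB_right {m : Nat} (a : String) (rest : List String)
    (hhead : ∀ b, rest.head? = some b → b ≠ a) (j : Nat) :
    inLongRunB (List.replicate m a ++ rest) (m + j) = inLongRunB rest j := by
  have hx : (List.replicate m a ++ rest).getD (m + j) "" = rest.getD j "" := by
    rw [getD_rep_right a rest (by omega)]; congr 1; omega
  have hiff : inLongRunB (List.replicate m a ++ rest) (m + j) = true ↔
      inLongRunB rest j = true := by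
    rw [inLongRunB_iff, inLongRunB_iff, hx]
    constructor
    · rintro ⟨s, h1, h2, hw⟩
      by_cases hsm : s < m
      · exact absurd hw (winP_no_cross a rest hhead hsm (by omega))
      · rw [winP_shift a rest (by omega)] at hw
        exact ⟨s - m, by omega, by omega, hw⟩
    · rintro ⟨s, h1, h2, hw⟩
      refine ⟨m + s, by omega, by omega, ?_⟩
      rw [winP_shift a rest (by omega)]
      rwa [show m + s - m = s by omega]
  cases hA : inLongRunB (List.replicate m a ++ rest) (m + j) <;>
    cases hB : inLongRunB rest j <;> simp_all

theorem fB_left {m : Nat} (a : String) (rest : List String)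
    (hhead : ∀ b, rest.head? = some b → b ≠ a) {i : Nat} (hi : i < m) :
    fB (List.replicate m a ++ rest) i =
      if (a = "H" ∨ a = "E") ∧ m < 3 then "C" else a := by
  unfold fB
  rw [getD_rep_left a rest hi]
  by_cases hcond : (a = "H" ∨ a = "E") ∧ m < 3
  · rw [if_pos hcond]
    have hnl : inLongRunB (List.replicate m a ++ rest) i = false := by
      rw [← Bool.not_eq_true, inLongRunB_left a rest hhead hi]; omega
    rw [if_pos]
    simp only [hnl, Bool.not_false, Bool.and_true, Bool.or_eq_true, beq_iff_eq]
    tauto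
  · rw [if_neg hcond]
    by_cases ha : a = "H" ∨ a = "E"
    · have hm : 3 ≤ m := by
        by_contra hlt
        exact hcond ⟨ha, by omega⟩
      have hl : inLongRunB (List.replicate m a ++ rest) i = true := by
        rw [inLongRunB_left a rest hhead hi]; exact hm
      rw [if_neg]
      simp [hl]
    · rw [if_neg]
      simp only [Bool.and_eq_true, Bool.or_eq_true, beq_iff_eq]
      tauto

theorem fB_right {m : Nat} (a : String) (rest : List String)
    (hhead : ∀ b, rest.head? = some b → b ≠ a) (j : Nat) :
    fB (List.replicate m a ++ rest) (m + j) = fB rest j := by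
  unfold fB
  rw [inLongRunB_right a rest hhead j,
    getD_rep_right a rest (by omega), show m + j - m = j by omega]

theorem map_range_const {m : Nat} {g : Nat → String} {c : String}
    (h : ∀ i < m, g i = c) : (List.range m).map g = List.replicate m c := by
  induction m with
  | zero => simp
  | succ m ih =>
    rw [List.range_succ, List.map_append, ih (fun i hi => h i (by omega)),
      List.replicate_succ']
    simp [h m (by omega)]

theorem head?_dropWhile_ne (x : String) (l : List String) :
    ∀ b, (l.dropWhile (· == x)).head? = some b → b ≠ x := by
  induction l with
  | nil => intro b h; simp at h
  | cons y ys ih =>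
    intro b h
    by_cases hy : y = x
    · subst hy
      rw [List.dropWhile_cons_of_pos (by simp)] at h
      exact ih b h
    · rw [List.dropWhile_cons_of_neg (by simpa using hy)] at h
      simp at h
      subst h; exact hy

theorem mapB_eq_runsF (l : List String) :
    (List.range l.length).map (fB l) = runsF l := by
  fun_induction runsF with
  | case1 => simp
  | case2 x xs ih =>
    set t := (xs.takeWhile (· == x)).length with ht
    have htw_rep : xs.takeWhile (· == x) = List.replicate t x := by
      apply List.eq_replicate_of_mem
      intro b hb
      have := List.mem_takeWhile_imp hb
      simpa using this
    set rest := xs.dropWhile (· == x) with hrest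
    have hhead : ∀ b, rest.head? = some b → b ≠ x := head?_dropWhile_ne x xs
    have hdecomp : x :: xs = List.replicate (t + 1) x ++ rest := by
      rw [List.replicate_succ, List.cons_append]
      congr 1
      rw [← htw_rep, hrest, List.takeWhile_append_dropWhile]
    rw [hdecomp]
    have hlen : (List.replicate (t + 1) x ++ rest).length = (t + 1) + rest.length := by
      simp
    rw [hlen, List.range_add, List.map_append, List.map_map]
    congr 1
    · rw [emitB_some]
      by_cases hc : (x = "H" ∨ x = "E") ∧ t + 1 < 3
      · rw [if_pos hc]
        apply map_range_const
        intro i hi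
        rw [fB_left x rest hhead hi, if_pos hc]
      · rw [if_neg hc]
        apply map_range_const
        intro i hi
        rw [fB_left x rest hhead hi, if_neg hc]
    · rw [← ih]
      apply List.map_congr_left
      intro j hj
      simpa using fB_right x rest hhead j

-- ---- A = runsF ----

theorem findEndA_eq (result : List String) (c : String) (j : Nat) :
    findEndA result c result.length j
      = j + ((result.drop j).takeWhile (· == c)).length := by
  fun_induction findEndA with
  | case1 j h ih =>
    obtain ⟨hj, he⟩ := h
    rw [List.drop_eq_getElem_cons hj]
    have hg : result.getD j "" = result[j] := by
      simp [List.getD, List.getElem?_eq_getElem hj]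
    rw [hg] at he
    simp only [List.takeWhile, he, List.length_cons]
    omega
  | case2 j h =>
    by_cases hj : j < result.length
    · have he : ¬ (result.getD j "" == c) = true := by tauto
      rw [List.drop_eq_getElem_cons hj]
      have hg : result.getD j "" = result[j] := by
        simp [List.getD, List.getElem?_eq_getElem hj]
      rw [hg] at he
      simp [List.takeWhile, he]
    · have : result.drop j = [] := List.drop_eq_nil_of_le (by omega)
      simp [this]

set_option maxRecDepth 4000 in
theorem foldl_set_range' (len : Nat) :
    ∀ (i : Nat) (result : List String), i + len ≤ result.length →
    (List.range' i len).foldl (fun r k => r.set k "C") result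
      = result.take i ++ List.replicate len "C" ++ result.drop (i + len) := by
  induction len with
  | zero => intro i result h; simp
  | succ len ih =>
    intro i result h
    have hi : i < result.length := by omega
    rw [List.range'_succ, List.foldl_cons,
      ih (i + 1) (result.set i "C") (by rw [List.length_set]; omega)]
    have h1 : (result.set i "C").drop (i + 1 + len) = result.drop (i + 1 + len) :=
      List.drop_set_of_lt (by omega)
    have h2 : (result.set i "C").take (i + 1) = result.take i ++ ["C"] := by
      rw [List.take_set, List.take_add_one, List.getElem?_eq_getElem hi]
      rw [List.set_append]
      have hlt : ¬ i < (result.take i).length := by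
        simp only [List.length_take]; omega
      rw [if_neg hlt]
      simp [List.length_take, Nat.min_eq_left (le_of_lt hi)]
    rw [h1, h2]
    rw [show i + (len + 1) = i + 1 + len by omega, List.replicate_succ]
    simp [List.append_assoc]

theorem loopA_eq (n : Nat) : ∀ (i : Nat) (result : List String), result.length = n →
    loopA n result i = result.take i ++ runsF (result.drop i) := by
  intro i
  induction hn : n - i using Nat.strong_induction_on generalizing i with
  | _ fuel ih =>
  intro result hlen
  rw [loopA]
  by_cases hi : i < n
  · simp only [dif_pos hi]
    have hi' : i < result.length := by omega
    have hg : result.getD i "" = result[i] := by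
      simp [List.getD, List.getElem?_eq_getElem hi']
    set c := result[i] with hc
    have hfe : findEndA result c n (i + 1)
        = i + 1 + ((result.drop (i + 1)).takeWhile (· == c)).length := by
      rw [← hlen]; exact findEndA_eq result c (i + 1)
    set t := ((result.drop (i + 1)).takeWhile (· == c)).length with ht
    clear_value t
    have htle : t ≤ result.length - (i + 1) := by
      have h1 : ((result.drop (i + 1)).takeWhile (· == c)).Sublist (result.drop (i + 1)) :=
        List.takeWhile_sublist _
      have h2 := h1.length_le
      simp at h2
      omega
    have hdropi : result.drop i = c :: result.drop (i + 1) := by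
      rw [List.drop_eq_getElem_cons hi']
    have htw_rep : (result.drop (i + 1)).takeWhile (· == c) = List.replicate t c := by
      rw [ht]
      apply List.eq_replicate_of_mem
      intro b hb
      have := List.mem_takeWhile_imp hb
      simpa using this
    have hdw : (result.drop (i + 1)).dropWhile (· == c) = result.drop (i + 1 + t) := by
      have hsplit := List.takeWhile_append_dropWhile (p := (· == c)) (l := result.drop (i + 1))
      have := List.drop_left' (l₁ := (result.drop (i + 1)).takeWhile (· == c))
        (l₂ := (result.drop (i + 1)).dropWhile (· == c)) (i := t) ht.symm
      rw [hsplit] at this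
      rw [← this, List.drop_drop]
    have hrunsF : runsF (result.drop i)
        = emitB (some c) (t + 1) ++ runsF (result.drop (i + 1 + t)) := by
      rw [hdropi, runsF, ← ht, ← hdw]
    have htakeseg : result.take (i + 1 + t) = result.take i ++ List.replicate (t + 1) c := by
      rw [show i + 1 + t = i + (1 + t) by omega, List.take_add]
      congr 1
      rw [hdropi]
      rw [show 1 + t = t + 1 by omega]
      simp only [List.take_succ_cons]
      congr 1
      have := List.take_left' (l₁ := (result.drop (i + 1)).takeWhile (· == c))
        (l₂ := (result.drop (i + 1)).dropWhile (· == c)) (i := t) ht.symm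
      rw [List.takeWhile_append_dropWhile] at this
      rw [this, htw_rep]
    rw [hg, hfe]
    by_cases hcond : (c = "H" ∨ c = "E") ∧ (i + 1 + t - i) < 3
    · have ht1 : i + 1 + t - i = t + 1 := by omega
      rw [ht1] at hcond
      rw [if_pos (by rw [ht1]; exact hcond)]
      rw [show List.range' i (i + 1 + t - i) = List.range' i (t + 1) by rw [ht1],
        foldl_set_range' (t + 1) i result (by omega)]
      have hexp : result.take i ++ List.replicate (t + 1) "C" ++ result.drop (i + (t + 1))
          = (result.take i ++ List.replicate (t + 1) "C") ++ result.drop (i + 1 + t) := by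
        rw [show i + (t + 1) = i + 1 + t by omega]
      rw [hexp]
      have hplen : (result.take i ++ List.replicate (t + 1) "C").length = i + 1 + t := by
        simp [List.length_take]
        omega
      have hlen' : ((result.take i ++ List.replicate (t + 1) "C") ++ result.drop (i + 1 + t)).length = n := by
        simp [List.length_take]
        omega
      rw [ih (n - (i + 1 + t)) (by omega) (i + 1 + t) rfl _ hlen']
      rw [List.take_left' hplen, List.drop_left' hplen]
      rw [hrunsF]
      have hemit : emitB (some c) (t + 1) = List.replicate (t + 1) "C" := by
        rw [emitB_some, if_pos hcond]
      rw [hemit, List.append_assoc]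
    · have ht1 : i + 1 + t - i = t + 1 := by omega
      rw [ht1] at hcond
      rw [if_neg (by rw [ht1]; exact hcond)]
      rw [ih (n - (i + 1 + t)) (by omega) (i + 1 + t) rfl result hlen]
      rw [hrunsF, htakeseg]
      have hemit : emitB (some c) (t + 1) = List.replicate (t + 1) c := by
        rw [emitB_some, if_neg hcond]
      rw [hemit, List.append_assoc]
  · simp only [dif_neg hi]
    have h1 : result.take i = result := List.take_of_length_le (by omega)
    have h2 : result.drop i = [] := List.drop_eq_nil_of_le (by omega)
    rw [h1, h2, runsF]
    simp

-- ===== VERDICT (by name: the statement is the Claim_ definition above) =====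
theorem apply_minimum_length_constraints_py_spec : Claim_equal_apply_minimum_length_constraints_py := by
  intro predictions _
  unfold Spec_apply_minimum_length_constraints_py
  rw [alt_eq_map, mapB_eq_runsF, apply_minimum_length_constraints_py,
    loopA_eq predictions.length 0 predictions rfl]
  simp
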